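-- pv_equiv track=rewrite | github.com/lifecycles1/competitive-programming | codesignal/arcade/2.core/13.waterfall of integration/4.contoursShifting.py | contoursShifting
-- ===== SOURCE A (Python) =====
-- from collections import OrderedDict
-- import math
--
-- def contoursShifting(matrix):
--     layers = math.ceil(min(len(matrix), len(matrix[0])) / 2)
--     # layers
--     for l in range(layers):
--         # directions
--         wr, wc = len(matrix[0])-l, len(matrix)-l
--         cells = [(l,c) for c in range(l, wr)] + [(r,wr-1) for r in range(l+1,wc)]
--         cells += [(wc-1, c) for c in range(wr-2, l-1, -1)] + [(r, l) for r in range(wc-2, l, -1)]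
--         stored = None
--         cells = list(OrderedDict.fromkeys(cells))
--         if l % 2:
--             cells = cells[::-1]
--         for cell in cells:
--             r, c = cell[0], cell[1]
--             matrix[r][c], stored = stored, matrix[r][c]
--         matrix[cells[0][0]][cells[0][1]] = stored
--
--     return matrix
-- ===== SOURCE B (Python) =====
-- import math
--
-- def contoursShifting(matrix):
--     rows, cols = len(matrix), len(matrix[0])
--     for l in range(math.ceil(min(rows, cols) / 2)):
--         top, bottom, left, right = l, rows - 1 - l, l, cols - 1 - l
--         if top == bottom:
--             cells = [(top, c) for c in range(left, right + 1)]
--         elif left == right: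
--             cells = [(r, left) for r in range(top, bottom + 1)]
--         else:
--             cells = ([(top, c) for c in range(left, right + 1)]
--                      + [(r, right) for r in range(top + 1, bottom + 1)]
--                      + [(bottom, c) for c in range(right - 1, left - 1, -1)]
--                      + [(r, left) for r in range(bottom - 1, top, -1)])
--         vals = [matrix[r][c] for r, c in cells]
--         # even layers rotate forward, odd layers rotate backward (A reverses the ring instead)
--         vals = vals[-1:] + vals[:-1] if l % 2 == 0 else vals[1:] + vals[:1]
--         for (r, c), v in zip(cells, vals):
--             matrix[r][c] = v
--     return matrix
-- ===== Notes on version B (the rewrite author's own statement) =====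
-- stated objective: simpler
-- what changed: B builds each ring's coordinates directly by case (single row / single column / full rectangle) instead of A's four overlapping comprehensions deduplicated through OrderedDict, and replaces A's in-place carry-swap walk plus odd-layer ring reversal by reading the ring into a list, rotating it with slicing (forward on even layers, backward on odd ones) and writing it back.
import Mathlib
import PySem

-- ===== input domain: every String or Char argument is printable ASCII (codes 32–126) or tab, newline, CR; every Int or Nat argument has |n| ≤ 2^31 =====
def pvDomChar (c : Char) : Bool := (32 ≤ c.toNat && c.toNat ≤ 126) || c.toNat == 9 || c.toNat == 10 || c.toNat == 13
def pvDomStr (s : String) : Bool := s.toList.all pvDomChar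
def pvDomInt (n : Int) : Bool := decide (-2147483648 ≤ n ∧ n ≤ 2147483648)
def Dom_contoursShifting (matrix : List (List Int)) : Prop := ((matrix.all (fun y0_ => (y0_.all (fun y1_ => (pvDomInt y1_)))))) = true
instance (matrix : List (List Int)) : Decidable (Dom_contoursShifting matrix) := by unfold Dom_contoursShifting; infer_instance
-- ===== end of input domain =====

-- B re-decomposes A's ring shift: explicit ring coordinates + a slice-rotation of the read-out values
-- instead of A's four-comprehension + OrderedDict dedup + in-place carry swap with a reversed ring on
-- odd layers.  Both Pythons mutate `matrix` in place and return it; the equivalence proved here is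
-- about the returned value.

-- matrix[r][c] read/write (Python nested indexing; the defaults are only reachable outside Pre_)
def pvGetCell (m : List (List Int)) (r c : Int) : Int :=
  PySem.List.pyGetD (PySem.List.pyGetD m r []) c 0

def pvSetCell (m : List (List Int)) (r c : Int) (v : Int) : List (List Int) :=
  PySem.List.pySetD m r (PySem.List.pySetD (PySem.List.pyGetD m r []) c v)

-- math.ceil(k / 2) = -((-k) // 2); exact for |k| ≤ 2^31 (float division is exact there)
def pvCeilHalf (k : Int) : Int := -(PySem.Int.floordiv (-k) 2)

-- ===== PORT A =====
def pvLayerA (mat : List (List Int)) (l : Int) : List (List Int) :=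
  let wr : Int := ((PySem.List.pyGetD mat 0 []).length : Int) - l
  let wc : Int := ((mat.length : Int)) - l
  let cells : List (Int × Int) :=
    (PySem.List.pyRange l wr 1).map (fun c => (l, c)) ++
    (PySem.List.pyRange (l+1) wc 1).map (fun r => (r, wr-1)) ++
    (PySem.List.pyRange (wr-2) (l-1) (-1)).map (fun c => (wc-1, c)) ++
    (PySem.List.pyRange (wc-2) l (-1)).map (fun r => (r, l))
  let cells := PySem.List.dedup cells
  let cells := if PySem.Int.mod l 2 ≠ 0 then (PySem.List.slice? cells none none (-1)).getD [] else cells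
  -- Python transiently writes None into the first visited cell; it is overwritten below before the
  -- return and (cells being distinct) never read, so the placeholder 0 never reaches the output.
  let st := cells.foldl
    (fun (p : List (List Int) × Option Int) cell =>
      (pvSetCell p.1 cell.1 cell.2 (p.2.getD 0), some (pvGetCell p.1 cell.1 cell.2)))
    (mat, none)
  pvSetCell st.1 (PySem.List.pyGetD cells 0 (0,0)).1 (PySem.List.pyGetD cells 0 (0,0)).2 (st.2.getD 0)

def contoursShifting (matrix : List (List Int)) : List (List Int) :=
  let layers : Int := pvCeilHalf (min ((matrix.length : Int)) (((PySem.List.pyGetD matrix 0 []).length : Int)))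
  (PySem.List.pyRange 0 layers 1).foldl pvLayerA matrix

-- ===== PORT B =====
def pvRingCells (rows cols l : Int) : List (Int × Int) :=
  let top := l
  let bottom := rows - 1 - l
  let left := l
  let right := cols - 1 - l
  if top = bottom then (PySem.List.pyRange left (right+1) 1).map (fun c => (top, c))
  else if left = right then (PySem.List.pyRange top (bottom+1) 1).map (fun r => (r, left))
  else
    (PySem.List.pyRange left (right+1) 1).map (fun c => (top, c)) ++
    (PySem.List.pyRange (top+1) (bottom+1) 1).map (fun r => (r, right)) ++
    (PySem.List.pyRange (right-1) (left-1) (-1)).map (fun c => (bottom, c)) ++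
    (PySem.List.pyRange (bottom-1) top (-1)).map (fun r => (r, left))

def pvLayerB (rows cols : Int) (mat : List (List Int)) (l : Int) : List (List Int) :=
  let cells := pvRingCells rows cols l
  let vals := cells.map (fun cell => pvGetCell mat cell.1 cell.2)
  let vals := if PySem.Int.mod l 2 = 0
    then PySem.List.slice vals (some (-1)) none ++ PySem.List.slice vals none (some (-1))
    else PySem.List.slice vals (some 1) none ++ PySem.List.slice vals none (some 1)
  (cells.zip vals).foldl (fun m p => pvSetCell m p.1.1 p.1.2 p.2) mat

def contoursShifting_alt (matrix : List (List Int)) : List (List Int) :=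
  let rows : Int := (matrix.length : Int)
  let cols : Int := ((PySem.List.pyGetD matrix 0 []).length : Int)
  let layers : Int := pvCeilHalf (min rows cols)
  (PySem.List.pyRange 0 layers 1).foldl (pvLayerB rows cols) matrix

-- ===== PRECONDITION & SPEC =====
-- Pre_ excludes exactly the inputs on which the Python A raises (IndexError): the empty matrix
-- (matrix[0]) and ragged matrices with some row shorter than row 0 (ring indexing walks off it).
def Pre_contoursShifting (matrix : List (List Int)) : Prop :=
  matrix ≠ [] ∧ ∀ row ∈ matrix, (matrix.headD []).length ≤ row.length
instance (matrix : List (List Int)) : Decidable (Pre_contoursShifting matrix) := by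
  unfold Pre_contoursShifting; infer_instance

def pvWitness_contoursShifting : List (List Int) := [[1, 2, 3], [4, 5, 6], [7, 8, 9]]

def Spec_contoursShifting (matrix : List (List Int)) (out : List (List Int)) : Prop := out = contoursShifting_alt matrix
instance (matrix : List (List Int)) (out : List (List Int)) : Decidable (Spec_contoursShifting matrix out) := by unfold Spec_contoursShifting; infer_instance

-- ===== CLAIM (what is proved, stated in full; the proofs are below) =====
def Claim_equal_contoursShifting : Prop := ∀ (matrix : List (List Int)), Dom_contoursShifting matrix → Pre_contoursShifting matrix → Spec_contoursShifting matrix (contoursShifting matrix)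

-- ===== LEMMAS AND PROOFS =====

theorem pv_getCell_eq (m : List (List Int)) (r c : Int) (hr : 0 ≤ r) (hc : 0 ≤ c) :
    pvGetCell m r c = (m.getD r.toNat []).getD c.toNat 0 := by
  unfold pvGetCell
  unfold PySem.List.pyGetD PySem.List.pyGet? PySem.List.pyIdx?
  simp only [if_pos hr, if_pos hc, List.getD]
  by_cases h1 : r < (m.length : Int)
  · simp only [if_pos h1, Option.bind]
    by_cases h2 : c < ((m[r.toNat]?.getD []).length : Int)
    · simp [h2]
    · simp only [if_neg h2]
      have : (m[r.toNat]?.getD [])[c.toNat]? = none :=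
        List.getElem?_eq_none_iff.mpr (by omega)
      simp [this]
  · simp only [if_neg h1, Option.bind]
    have h3 : m[r.toNat]? = none := List.getElem?_eq_none_iff.mpr (by omega)
    simp only [h3]
    simp [show ¬ c < (0:Int) by omega]

theorem pv_setCell_row? (m : List (List Int)) (r c : Int) (v : Int) (hr : 0 ≤ r) (hc : 0 ≤ c)
    (i : Nat) :
    (pvSetCell m r c v)[i]? =
      m[i]?.map (fun row => if (i : Int) = r then row.set c.toNat v else row) := by
  unfold pvSetCell PySem.List.pySetD PySem.List.pySet? PySem.List.pyGetD PySem.List.pyGet?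
    PySem.List.pyIdx?
  simp only [if_pos hr, if_pos hc]
  by_cases h1 : r < (m.length : Int)
  · have hrow : (m[r.toNat]?).getD [] = m[r.toNat]'(by omega) :=
      by rw [List.getElem?_eq_getElem (by omega)]; rfl
    simp only [if_pos h1, Option.bind, Option.map_some, Option.getD_some]
    by_cases hi : i = r.toNat
    · subst hi
      rw [List.getElem?_set_self (by omega)]
      rw [List.getElem?_eq_getElem (show r.toNat < m.length by omega)]
      simp only [Option.getD_some, Option.map_some]
      rw [if_pos (show ((r.toNat : Int)) = r by omega)]
      congr 1
      split_ifs with h2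
      · simp
      · simp only [Option.map_none, Option.getD_none]
        rw [List.set_eq_of_length_le (by omega)]
    · rw [List.getElem?_set_ne (by omega)]
      rcases h : m[i]? with _ | row
      · simp
      · simp only [Option.map_some]
        rw [if_neg (by omega)]
  · simp only [if_neg h1, Option.bind, Option.map_none, Option.getD_none]
    rcases h : m[i]? with _ | row
    · simp
    · have hi := (List.getElem?_eq_some_iff.mp h).1
      simp only [Option.map_some]
      rw [if_neg (by omega)]

theorem pv_length_setCell (m : List (List Int)) (r c : Int) (v : Int) :
    (pvSetCell m r c v).length = m.length := by
  unfold pvSetCell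
  exact PySem.List.length_pySetD ..

theorem pv_rowlen_setCell (m : List (List Int)) {r c : Int} (v : Int) (hr : 0 ≤ r)
    (hc : 0 ≤ c) (i : Nat) :
    ((pvSetCell m r c v).getD i []).length = (m.getD i []).length := by
  simp only [List.getD]
  rw [pv_setCell_row? m r c v hr hc i]
  rcases h : m[i]? with _ | row
  · simp
  · simp only [Option.map_some, Option.getD_some]
    split_ifs <;> simp

theorem pv_getCell_setCell_ne (m : List (List Int)) {r c r' c' : Int} (v : Int)
    (hr : 0 ≤ r) (hc : 0 ≤ c) (hr' : 0 ≤ r') (hc' : 0 ≤ c')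
    (hne : (r, c) ≠ (r', c')) :
    pvGetCell (pvSetCell m r' c' v) r c = pvGetCell m r c := by
  rw [pv_getCell_eq _ _ _ hr hc, pv_getCell_eq _ _ _ hr hc]
  simp only [List.getD]
  rw [pv_setCell_row? m r' c' v hr' hc' r.toNat]
  rcases h : m[r.toNat]? with _ | row
  · simp
  · simp only [Option.map_some, Option.getD_some]
    by_cases heq : ((r.toNat : Nat) : Int) = r'
    · rw [if_pos heq]
      have hcc : c ≠ c' := by
        intro hcc
        exact hne (by simp [show r = r' by omega, hcc])
      rw [List.getElem?_set_ne (by omega)]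
    · rw [if_neg heq]

theorem pv_setCell_comm (m : List (List Int)) {r c r' c' : Int} (v v' : Int)
    (hr : 0 ≤ r) (hc : 0 ≤ c) (hr' : 0 ≤ r') (hc' : 0 ≤ c')
    (hne : (r, c) ≠ (r', c')) :
    pvSetCell (pvSetCell m r c v) r' c' v' = pvSetCell (pvSetCell m r' c' v') r c v := by
  apply List.ext_getElem?
  intro i
  rw [pv_setCell_row? _ _ _ _ hr' hc', pv_setCell_row? _ _ _ _ hr hc,
    pv_setCell_row? _ _ _ _ hr hc, pv_setCell_row? _ _ _ _ hr' hc']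
  rcases h : m[i]? with _ | row
  · simp
  · simp only [Option.map_some]
    by_cases h1 : ((i : Nat) : Int) = r <;> by_cases h2 : ((i : Nat) : Int) = r'
    · have : c ≠ c' := by
        intro hcc
        exact hne (by simp [show r = r' by omega, hcc])
      simp only [if_pos h1, if_pos h2]
      rw [List.set_comm _ _ (by omega)]
    · simp only [if_pos h1, if_neg h2]
    · simp only [if_neg h1, if_pos h2]
    · simp only [if_neg h1, if_neg h2]

theorem pv_setCell_setCell (m : List (List Int)) (r c : Int) (v v' : Int)
    (hr : 0 ≤ r) (hc : 0 ≤ c) :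
    pvSetCell (pvSetCell m r c v) r c v' = pvSetCell m r c v' := by
  apply List.ext_getElem?
  intro i
  rw [pv_setCell_row? _ _ _ _ hr hc, pv_setCell_row? _ _ _ _ hr hc,
    pv_setCell_row? _ _ _ _ hr hc]
  rcases h : m[i]? with _ | row
  · simp
  · simp only [Option.map_some]
    by_cases h1 : ((i : Nat) : Int) = r
    · simp only [if_pos h1, List.set_set]
    · simp only [if_neg h1]

def pvWrites (m : List (List Int)) (ps : List ((Int × Int) × Int)) : List (List Int) :=
  ps.foldl (fun m p => pvSetCell m p.1.1 p.1.2 p.2) m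

def pvValsOf (m : List (List Int)) (cs : List (Int × Int)) : List Int :=
  cs.map (fun p => pvGetCell m p.1 p.2)

theorem pv_length_pvWrites (ps : List ((Int × Int) × Int)) (m : List (List Int)) :
    (pvWrites m ps).length = m.length := by
  induction ps generalizing m with
  | nil => rfl
  | cons p ps ih => rw [pvWrites, List.foldl_cons, ← pvWrites, ih, pv_length_setCell]

theorem pv_rowlen_pvWrites (ps : List ((Int × Int) × Int)) (m : List (List Int))
    (hpos : ∀ q ∈ ps, 0 ≤ q.1.1 ∧ 0 ≤ q.1.2) (i : Nat) :
    ((pvWrites m ps).getD i []).length = (m.getD i []).length := by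
  induction ps generalizing m with
  | nil => rfl
  | cons p ps ih =>
    rw [pvWrites, List.foldl_cons, ← pvWrites,
      ih _ (fun q hq => hpos q (List.mem_cons_of_mem _ hq)),
      pv_rowlen_setCell _ _ (hpos p List.mem_cons_self).1 (hpos p List.mem_cons_self).2]

theorem pv_setCell_pvWrites (ps : List ((Int × Int) × Int)) (m : List (List Int))
    {r c : Int} (v : Int) (hr : 0 ≤ r) (hc : 0 ≤ c)
    (h : ∀ q ∈ ps, (0 ≤ q.1.1 ∧ 0 ≤ q.1.2) ∧ q.1 ≠ (r, c)) :
    pvSetCell (pvWrites m ps) r c v = pvWrites (pvSetCell m r c v) ps := by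
  induction ps generalizing m with
  | nil => rfl
  | cons p ps ih =>
    have e : ∀ mm, pvWrites mm (p :: ps) = pvWrites (pvSetCell mm p.1.1 p.1.2 p.2) ps :=
      fun _ => rfl
    rw [e, e, ih _ (fun q hq => h q (List.mem_cons_of_mem _ hq))]
    congr 1
    have hp := h p List.mem_cons_self
    exact pv_setCell_comm m _ _ hp.1.1 hp.1.2 hr hc (by
      intro hcontra
      exact hp.2 (by rw [← hcontra]))

theorem pv_pvWrites_reverse (ps : List ((Int × Int) × Int)) (m : List (List Int))
    (hnd : (ps.map (·.1)).Nodup) (hpos : ∀ q ∈ ps, 0 ≤ q.1.1 ∧ 0 ≤ q.1.2) :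
    pvWrites m ps.reverse = pvWrites m ps := by
  induction ps generalizing m with
  | nil => rfl
  | cons p ps ih =>
    simp only [List.reverse_cons]
    have ea : pvWrites m (ps.reverse ++ [p]) = pvSetCell (pvWrites m ps.reverse) p.1.1 p.1.2 p.2 := by
      unfold pvWrites
      rw [List.foldl_append]
      rfl
    rw [ea]
    simp only [List.map_cons, List.nodup_cons] at hnd
    rw [ih _ hnd.2 (fun q hq => hpos q (List.mem_cons_of_mem _ hq))]
    have hp := hpos p List.mem_cons_self
    rw [pv_setCell_pvWrites ps m p.2 hp.1 hp.2 (by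
      intro q hq
      refine ⟨hpos q (List.mem_cons_of_mem _ hq), ?_⟩
      intro hcontra
      rw [show (p.1.1, p.1.2) = p.1 from rfl] at hcontra
      exact hnd.1 (hcontra ▸ List.mem_map_of_mem hq))]
    rfl

theorem pv_valsOf_setCell (cs : List (Int × Int)) (m : List (List Int)) {r c : Int} (v : Int)
    (hr : 0 ≤ r) (hc : 0 ≤ c)
    (h : ∀ p ∈ cs, (0 ≤ p.1 ∧ 0 ≤ p.2) ∧ p ≠ (r, c)) :
    pvValsOf (pvSetCell m r c v) cs = pvValsOf m cs := by
  unfold pvValsOf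
  apply List.map_congr_left
  intro p hp
  obtain ⟨⟨h1, h2⟩, h3⟩ := h p hp
  exact pv_getCell_setCell_ne m v h1 h2 hr hc (by
    intro hcontra
    exact h3 (by rcases p with ⟨a, b⟩; simpa using hcontra))

theorem pv_getLast?_or (x : Int) (xs : List Int) (po : Option Int) :
    (x :: xs).getLast?.or po = xs.getLast?.or (some x) := by
  cases xs with
  | nil => simp
  | cons y ys =>
    rcases hg : (y :: ys).getLast? with _ | z
    · simp at hg
    · simp [List.getLast?_cons_cons, hg]

theorem pv_carry_fold (cs : List (Int × Int)) (m : List (List Int)) (po : Option Int)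
    (hnd : cs.Nodup) (hpos : ∀ p ∈ cs, 0 ≤ p.1 ∧ 0 ≤ p.2) :
    cs.foldl
      (fun (p : List (List Int) × Option Int) cell =>
        (pvSetCell p.1 cell.1 cell.2 (p.2.getD 0), some (pvGetCell p.1 cell.1 cell.2)))
      (m, po)
    = (pvWrites m (cs.zip (po.getD 0 :: pvValsOf m cs)), (pvValsOf m cs).getLast?.or po) := by
  induction cs generalizing m po with
  | nil => simp [pvWrites, pvValsOf]
  | cons c t ih =>
    simp only [List.nodup_cons] at hnd
    rw [List.foldl_cons]
    rw [ih _ _ hnd.2 (fun p hp => hpos p (List.mem_cons_of_mem _ hp))]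
    have hc := hpos c List.mem_cons_self
    have hvals : pvValsOf (pvSetCell m c.1 c.2 (po.getD 0)) t = pvValsOf m t := by
      apply pv_valsOf_setCell t m _ hc.1 hc.2
      intro p hp
      refine ⟨hpos p (List.mem_cons_of_mem _ hp), ?_⟩
      intro hcontra
      exact hnd.1 (by rcases c with ⟨a, b⟩; rw [show p = (a, b) from hcontra] at hp; exact hp)
    rw [hvals]
    have hval2 : pvValsOf m (c :: t) = pvGetCell m c.1 c.2 :: pvValsOf m t := rfl
    rw [hval2, pv_getLast?_or, List.zip_cons_cons]
    rfl

theorem pv_zip_trunc {α β : Type} (xs : List α) (ys : List β) :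
    xs.zip (ys.take xs.length) = xs.zip ys := by
  induction xs generalizing ys with
  | nil => simp
  | cons x xs ih =>
    cases ys with
    | nil => simp
    | cons y ys => simp [List.zip_cons_cons, ih]

theorem pv_zip_rev {α β : Type} (xs : List α) (ys : List β) (h : xs.length = ys.length) :
    (xs.zip ys).reverse = xs.reverse.zip ys.reverse := by
  induction xs generalizing ys with
  | nil => simp
  | cons x xs ih =>
    cases ys with
    | nil => simp at h
    | cons y ys =>
      simp only [List.zip_cons_cons, List.reverse_cons]
      rw [ih ys (by simpa using h), List.zip_append (by simpa using h)]
      rfl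

theorem pv_drop_len_sub_one {α : Type} (l : List α) (d : α) (h : l ≠ []) :
    l.drop (l.length - 1) = [l.getLast?.getD d] := by
  induction l with
  | nil => simp at h
  | cons x xs ih =>
    cases xs with
    | nil => simp
    | cons y ys =>
      have := ih (by simp)
      rw [List.getLast?_cons_cons]
      rw [show (x :: y :: ys).length - 1 = (y :: ys).length - 1 + 1 by simp]
      rw [List.drop_succ_cons]
      exact this

theorem pv_ringA (ds : List (Int × Int)) (m : List (List Int))
    (hnd : ds.Nodup) (hpos : ∀ p ∈ ds, 0 ≤ p.1 ∧ 0 ≤ p.2) (hne : ds ≠ []) :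
    pvSetCell
      (ds.foldl
        (fun (p : List (List Int) × Option Int) cell =>
          (pvSetCell p.1 cell.1 cell.2 (p.2.getD 0), some (pvGetCell p.1 cell.1 cell.2)))
        (m, none)).1
      (PySem.List.pyGetD ds 0 (0,0)).1 (PySem.List.pyGetD ds 0 (0,0)).2
      ((ds.foldl
        (fun (p : List (List Int) × Option Int) cell =>
          (pvSetCell p.1 cell.1 cell.2 (p.2.getD 0), some (pvGetCell p.1 cell.1 cell.2)))
        (m, none)).2.getD 0)
    = pvWrites m (ds.zip ((pvValsOf m ds).getLast?.getD 0 :: pvValsOf m ds)) := by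
  obtain ⟨d, t, rfl⟩ : ∃ d t, ds = d :: t := by
    cases ds with
    | nil => simp at hne
    | cons d t => exact ⟨d, t, rfl⟩
  rw [pv_carry_fold _ _ _ hnd hpos]
  simp only [Option.or_none]
  have hget0 : PySem.List.pyGetD (d :: t) 0 ((0 : Int), (0 : Int)) = d := by
    rw [PySem.List.pyGetD_zero]; rfl
  rw [hget0]
  simp only [List.nodup_cons] at hnd
  have hd := hpos d List.mem_cons_self
  have hvals : pvValsOf m (d :: t) = pvGetCell m d.1 d.2 :: pvValsOf m t := rfl
  rw [hvals, List.zip_cons_cons, List.zip_cons_cons]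
  have e1 : pvWrites m ((d, (none : Option Int).getD 0) :: t.zip (pvGetCell m d.1 d.2 :: pvValsOf m t))
      = pvWrites (pvSetCell m d.1 d.2 0) (t.zip (pvGetCell m d.1 d.2 :: pvValsOf m t)) := rfl
  rw [e1]
  have hside : ∀ q ∈ t.zip (pvGetCell m d.1 d.2 :: pvValsOf m t),
      (0 ≤ q.1.1 ∧ 0 ≤ q.1.2) ∧ q.1 ≠ (d.1, d.2) := by
    intro q hq
    have hq1 : q.1 ∈ t := by
      rcases q with ⟨a, b⟩
      exact (List.of_mem_zip hq).1
    refine ⟨hpos q.1 (List.mem_cons_of_mem _ hq1), ?_⟩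
    intro hcontra
    rw [show (d.1, d.2) = d from rfl] at hcontra
    exact hnd.1 (hcontra ▸ hq1)
  rw [pv_setCell_pvWrites _ _ _ hd.1 hd.2 hside]
  rw [pv_setCell_setCell _ _ _ _ _ hd.1 hd.2]
  rfl

theorem pv_set_add_of_mem {α : Type} [BEq α] [LawfulBEq α] (s : PySem.Set α) (x : α)
    (h : x ∈ s) : PySem.Set.add s x = s := by
  unfold PySem.Set.add
  rw [if_pos (by simpa using h)]

theorem pv_set_add_of_not_mem {α : Type} [BEq α] [LawfulBEq α] (s : PySem.Set α) (x : α)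
    (h : x ∉ s) : PySem.Set.add s x = s ++ [x] := by
  unfold PySem.Set.add
  rw [if_neg (by simpa using h)]

theorem pv_foldl_add_subset {α : Type} [BEq α] [LawfulBEq α] (ys : List α) (s : PySem.Set α)
    (h : ∀ y ∈ ys, y ∈ s) : ys.foldl PySem.Set.add s = s := by
  induction ys with
  | nil => rfl
  | cons y ys ih =>
    rw [List.foldl_cons, pv_set_add_of_mem s y (h y List.mem_cons_self)]
    exact ih (fun z hz => h z (List.mem_cons_of_mem _ hz))

theorem pv_foldl_add_nodup {α : Type} [BEq α] [LawfulBEq α] (ys : List α) :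
    ∀ (s : PySem.Set α), ys.Nodup → (∀ y ∈ ys, y ∉ s) → ys.foldl PySem.Set.add s = s ++ ys := by
  induction ys with
  | nil => intro s _ _; simp
  | cons y ys ih =>
    intro s hnd hdisj
    simp only [List.nodup_cons] at hnd
    rw [List.foldl_cons, pv_set_add_of_not_mem s y (hdisj y List.mem_cons_self)]
    rw [ih (s ++ [y]) hnd.2 (by
      intro z hz
      simp only [List.mem_append, List.mem_singleton]
      push Not
      exact ⟨hdisj z (List.mem_cons_of_mem _ hz), fun hzy => hnd.1 (hzy ▸ hz)⟩)]
    simp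

theorem pv_dedup_eq_self {α : Type} [BEq α] [LawfulBEq α] (xs : List α) (h : xs.Nodup) :
    PySem.List.dedup xs = xs := by
  rw [PySem.List.dedup_eq_ofList]
  unfold PySem.Set.ofList
  rw [pv_foldl_add_nodup xs PySem.Set.empty h (by intro y _; simp [PySem.Set.empty])]
  simp [PySem.Set.empty]

theorem pv_dedup_append_subset {α : Type} [BEq α] [LawfulBEq α] (xs ys : List α)
    (hx : xs.Nodup) (hsub : ∀ y ∈ ys, y ∈ xs) :
    PySem.List.dedup (xs ++ ys) = xs := by
  rw [PySem.List.dedup_eq_ofList]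
  unfold PySem.Set.ofList
  rw [List.foldl_append]
  rw [pv_foldl_add_nodup xs PySem.Set.empty hx (by intro y _; simp [PySem.Set.empty])]
  simp only [PySem.Set.empty, List.nil_append]
  exact pv_foldl_add_subset ys xs hsub

theorem pv_inj_pair_snd (l : Int) : Function.Injective (fun c : Int => (l, c)) := by
  intro a b hab; simpa using hab

theorem pv_inj_pair_fst (l : Int) : Function.Injective (fun r : Int => (r, l)) := by
  intro a b hab; simpa using hab

theorem pv_nodup_pyRange_neg_one (a b : Int) : (PySem.List.pyRange a b (-1)).Nodup := by
  rw [PySem.List.pyRange_neg_one_eq_reverse]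
  exact List.nodup_reverse.mpr (PySem.List.nodup_pyRange_one _ _)

theorem pv_cells_eq (rows cols l : Int) (hl : 0 ≤ l) (hr : 2*l+1 ≤ rows) (hc : 2*l+1 ≤ cols) :
    PySem.List.dedup (
      (PySem.List.pyRange l (cols - l) 1).map (fun c => (l, c)) ++
      (PySem.List.pyRange (l+1) (rows - l) 1).map (fun r => (r, cols - l - 1)) ++
      (PySem.List.pyRange (cols - l - 2) (l-1) (-1)).map (fun c => (rows - l - 1, c)) ++
      (PySem.List.pyRange (rows - l - 2) l (-1)).map (fun r => (r, l)))
    = pvRingCells rows cols l := by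
  by_cases hrow : rows = 2*l+1
  · -- single-row ring
    subst hrow
    rw [show 2*l+1 - l = l + 1 by ring, show l + 1 - 2 = l - 1 by ring,
      show l + 1 - 1 = l by ring]
    rw [PySem.List.pyRange_one_eq_nil (le_refl (l+1)),
      PySem.List.pyRange_neg_one_eq_nil (by omega : l - 1 ≤ l)]
    simp only [List.map_nil, List.append_nil, List.nil_append]
    rw [pv_dedup_append_subset _ _
      ((PySem.List.nodup_pyRange_one _ _).map (pv_inj_pair_snd l))
      (by
        intro y hy
        simp only [List.mem_map, PySem.List.mem_pyRange_neg_one] at hy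
        simp only [List.mem_map, PySem.List.mem_pyRange_one]
        obtain ⟨cc, ⟨h1, h2⟩, rfl⟩ := hy
        exact ⟨cc, ⟨by omega, by omega⟩, rfl⟩)]
    unfold pvRingCells
    rw [if_pos (by omega : l = 2*l+1 - 1 - l)]
    rw [show cols - 1 - l + 1 = cols - l by ring]
  · by_cases hcol : cols = 2*l+1
    · -- single-column ring
      subst hcol
      rw [show 2*l+1 - l = l + 1 by ring, show l + 1 - 2 = l - 1 by ring,
        show l + 1 - 1 = l by ring]
      rw [PySem.List.pyRange_one_singleton,
        PySem.List.pyRange_neg_one_eq_nil (le_refl (l-1))]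
      simp only [List.map_cons, List.map_nil, List.append_nil]
      rw [pv_dedup_append_subset _ _ ?nodup ?subset]
      case nodup =>
        rw [List.nodup_append]
        refine ⟨List.nodup_singleton _, (PySem.List.nodup_pyRange_one _ _).map (pv_inj_pair_fst l), ?_⟩
        intro a ha b hb
        simp only [List.mem_singleton] at ha
        simp only [List.mem_map, PySem.List.mem_pyRange_one] at hb
        obtain ⟨rr, ⟨h1, h2⟩, rfl⟩ := hb
        subst ha
        intro hcontra
        simp at hcontra
        omega
      case subset =>
        intro y hy
        simp only [List.mem_map, PySem.List.mem_pyRange_neg_one] at hy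
        simp only [List.mem_append, List.mem_singleton, List.mem_map,
          PySem.List.mem_pyRange_one]
        obtain ⟨rr, ⟨h1, h2⟩, rfl⟩ := hy
        right
        exact ⟨rr, ⟨by omega, by omega⟩, rfl⟩
      unfold pvRingCells
      rw [if_neg (by omega : ¬ l = rows - 1 - l)]
      rw [if_pos (by omega : l = 2*l+1 - 1 - l)]
      rw [show rows - 1 - l + 1 = rows - l by ring]
      rw [PySem.List.pyRange_one_cons (by omega : l < rows - l)]
      rw [List.map_cons, List.singleton_append]
    · -- full rectangular ring
      have hr2 : 2*l+2 ≤ rows := by omega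
      have hc2 : 2*l+2 ≤ cols := by omega
      rw [pv_dedup_eq_self]
      · unfold pvRingCells
        rw [if_neg (by omega : ¬ l = rows - 1 - l), if_neg (by omega : ¬ l = cols - 1 - l)]
        rw [show cols - 1 - l + 1 = cols - l by ring, show rows - 1 - l + 1 = rows - l by ring,
          show cols - 1 - l - 1 = cols - l - 2 by ring, show rows - 1 - l - 1 = rows - l - 2 by ring,
          show cols - 1 - l = cols - l - 1 by ring, show rows - 1 - l = rows - l - 1 by ring]
      · -- nodup of the four segments
        rw [List.nodup_append, List.nodup_append, List.nodup_append]
        refine ⟨⟨⟨List.Nodup.map (pv_inj_pair_snd l) (PySem.List.nodup_pyRange_one _ _),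
          List.Nodup.map (pv_inj_pair_fst (cols - l - 1)) (PySem.List.nodup_pyRange_one _ _), ?_⟩,
          List.Nodup.map (pv_inj_pair_snd (rows - l - 1)) (pv_nodup_pyRange_neg_one _ _), ?_⟩,
          List.Nodup.map (pv_inj_pair_fst l) (pv_nodup_pyRange_neg_one _ _), ?_⟩
        · intro a ha b hb heq
          subst heq
          simp only [List.mem_map, PySem.List.mem_pyRange_one] at ha hb
          obtain ⟨y, hy, rfl⟩ := hb
          obtain ⟨x, hx, hxa⟩ := ha
          simp only [Prod.mk.injEq] at hxa
          omega
        · intro a ha b hb heq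
          subst heq
          simp only [List.mem_append, List.mem_map, PySem.List.mem_pyRange_one,
            PySem.List.mem_pyRange_neg_one] at ha hb
          obtain ⟨y, hy, rfl⟩ := hb
          rcases ha with ⟨x, hx, hxa⟩ | ⟨x, hx, hxa⟩ <;>
            (simp only [Prod.mk.injEq] at hxa; omega)
        · intro a ha b hb heq
          subst heq
          simp only [List.mem_append, List.mem_map, PySem.List.mem_pyRange_one,
            PySem.List.mem_pyRange_neg_one] at ha hb
          obtain ⟨y, hy, rfl⟩ := hb
          rcases ha with (⟨x, hx, hxa⟩ | ⟨x, hx, hxa⟩) | ⟨x, hx, hxa⟩ <;>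
            (simp only [Prod.mk.injEq] at hxa; omega)

theorem pv_ringCells_nodup (rows cols l : Int) (hl : 0 ≤ l) (hr : 2*l+1 ≤ rows)
    (hc : 2*l+1 ≤ cols) : (pvRingCells rows cols l).Nodup := by
  rw [← pv_cells_eq rows cols l hl hr hc, PySem.List.dedup_eq_ofList]
  exact PySem.Set.nodup_ofList _

theorem pv_ringCells_nonneg (rows cols l : Int) (hl : 0 ≤ l) (hr : 2*l+1 ≤ rows)
    (hc : 2*l+1 ≤ cols) : ∀ p ∈ pvRingCells rows cols l, 0 ≤ p.1 ∧ 0 ≤ p.2 := by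
  intro p hp
  simp only [pvRingCells] at hp
  split_ifs at hp <;>
    simp only [List.mem_append, List.mem_map, PySem.List.mem_pyRange_one,
      PySem.List.mem_pyRange_neg_one] at hp
  · obtain ⟨x, hx, rfl⟩ := hp
    constructor <;> simp <;> omega
  · obtain ⟨x, hx, rfl⟩ := hp
    constructor <;> simp <;> omega
  · rcases hp with ((⟨x, hx, rfl⟩ | ⟨x, hx, rfl⟩) | ⟨x, hx, rfl⟩) | ⟨x, hx, rfl⟩ <;>
      constructor <;> simp <;> omega

theorem pv_ringCells_ne_nil (rows cols l : Int) (hl : 0 ≤ l) (hr : 2*l+1 ≤ rows)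
    (hc : 2*l+1 ≤ cols) : pvRingCells rows cols l ≠ [] := by
  simp only [pvRingCells]
  split_ifs
  · simp only [ne_eq, List.map_eq_nil_iff]
    rw [PySem.List.pyRange_one_cons (by omega : l < cols - 1 - l + 1)]
    simp
  · simp only [ne_eq, List.map_eq_nil_iff]
    rw [PySem.List.pyRange_one_cons (by omega : l < rows - 1 - l + 1)]
    simp
  · simp only [ne_eq, List.append_eq_nil_iff, List.map_eq_nil_iff]
    intro hcontra
    have := hcontra.1.1.1
    rw [PySem.List.pyRange_one_cons (by omega : l < cols - 1 - l + 1)] at this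
    simp at this

theorem pv_layer_eq (rows cols l : Int) (m : List (List Int)) (hl : 0 ≤ l)
    (hr : 2*l+1 ≤ rows) (hc : 2*l+1 ≤ cols)
    (hm : ((m.length : Nat) : Int) = rows)
    (h0 : (((PySem.List.pyGetD m 0 []).length : Nat) : Int) = cols) :
    pvLayerA m l = pvLayerB rows cols m l := by
  have hnd := pv_ringCells_nodup rows cols l hl hr hc
  have hpos := pv_ringCells_nonneg rows cols l hl hr hc
  have hnil := pv_ringCells_ne_nil rows cols l hl hr hc
  simp only [pvLayerA, pvLayerB]
  rw [hm, h0]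
  rw [pv_cells_eq rows cols l hl hr hc]
  have hW : ∀ ps, List.foldl (fun (mm : List (List Int)) (p : (Int × Int) × Int) =>
      pvSetCell mm p.1.1 p.1.2 p.2) m ps = pvWrites m ps := fun _ => rfl
  have hV : (pvRingCells rows cols l).map (fun cell => pvGetCell m cell.1 cell.2)
      = pvValsOf m (pvRingCells rows cols l) := rfl
  set cs := pvRingCells rows cols l with hcs
  set vals := pvValsOf m cs with hvalsdef
  have hlen : vals.length = cs.length := by rw [hvalsdef, pvValsOf, List.length_map]
  have hvne : vals ≠ [] := by
    intro hcontra
    exact hnil (by rwa [hcontra, List.length_nil, eq_comm, List.length_eq_zero_iff] at hlen)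
  have hcl : 0 < vals.length := List.length_pos_of_ne_nil hvne
  by_cases hpar : PySem.Int.mod l 2 = 0
  · rw [if_neg (by simpa using hpar), if_pos hpar]
    rw [pv_ringA cs m hnd hpos hnil]
    rw [hW, hV, ← hvalsdef]
    rw [PySem.List.slice_from_neg_one, PySem.List.slice_to_neg_one]
    rw [pv_drop_len_sub_one vals 0 hvne, List.dropLast_eq_take, List.singleton_append]
    congr 1
    have h1 : (vals.getLast?.getD 0) :: vals.take (vals.length - 1)
        = ((vals.getLast?.getD 0) :: vals).take cs.length := by
      rw [show cs.length = vals.length - 1 + 1 by omega, List.take_succ_cons]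
    rw [h1, pv_zip_trunc]
  · rw [if_pos hpar, if_neg hpar]
    rw [PySem.List.slice?_none_none_neg_one, Option.getD_some]
    rw [pv_ringA cs.reverse m (List.nodup_reverse.mpr hnd)
      (fun p hp => hpos p (List.mem_reverse.mp hp)) (by simpa using hnil)]
    have hvrev : pvValsOf m cs.reverse = (pvValsOf m cs).reverse := by
      rw [pvValsOf, pvValsOf, List.map_reverse]
    rw [hvrev, List.getLast?_reverse, hW, hV, ← hvalsdef]
    rw [PySem.List.slice_from vals (by norm_num : (0:Int) ≤ 1),
      PySem.List.slice_to vals (by norm_num : (0:Int) ≤ 1)]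
    obtain ⟨v, vt, hv⟩ : ∃ v vt, vals = v :: vt := by
      rcases hveq : vals with _ | ⟨v, vt⟩
      · exact absurd hveq hvne
      · exact ⟨_, _, rfl⟩
    have hvtlen : vt.length + 1 = cs.length := by
      rw [hv] at hlen
      simpa using hlen
    rw [hv]
    simp only [List.head?_cons, Option.getD_some, Int.toNat_one, List.drop_succ_cons,
      List.drop_zero, List.take_succ_cons, List.take_zero]
    rw [← pv_pvWrites_reverse (cs.zip (vt ++ [v])) m ?nd ?pos]
    case nd =>
      rw [List.map_fst_zip (by simp [← hvtlen])]
      exact hnd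
    case pos =>
      intro q hq
      rcases q with ⟨a, b⟩
      exact hpos a (List.of_mem_zip hq).1
    congr 1
    rw [pv_zip_rev cs (vt ++ [v]) (by simp [← hvtlen])]
    rw [show (vt ++ [v]).reverse = v :: vt.reverse by simp]
    rw [show (v :: vt : List Int).reverse = vt.reverse ++ [v] by simp]
    rw [← pv_zip_trunc cs.reverse (v :: (vt.reverse ++ [v]))]
    congr 1
    have hlen2 : cs.reverse.length = vt.length + 1 := by simp [← hvtlen]
    rw [hlen2, List.take_succ_cons]
    congr 1
    rw [show vt.length = vt.reverse.length by simp, List.take_left]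

theorem pv_layerB_len (rows cols l : Int) (m : List (List Int)) :
    (pvLayerB rows cols m l).length = m.length := by
  simp only [pvLayerB]
  exact pv_length_pvWrites _ m

theorem pv_layerB_rowlen (rows cols l : Int) (m : List (List Int)) (hl : 0 ≤ l)
    (hr : 2*l+1 ≤ rows) (hc : 2*l+1 ≤ cols) (i : Nat) :
    ((pvLayerB rows cols m l).getD i []).length = (m.getD i []).length := by
  simp only [pvLayerB]
  apply pv_rowlen_pvWrites
  intro q hq
  rcases q with ⟨a, b⟩
  exact pv_ringCells_nonneg rows cols l hl hr hc a (List.of_mem_zip hq).1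

theorem pv_fold_eq (rows cols : Int) (ls : List Int) : ∀ (m : List (List Int)),
    (∀ l ∈ ls, 0 ≤ l ∧ 2*l+1 ≤ rows ∧ 2*l+1 ≤ cols) →
    ((m.length : Int) = rows) → (((PySem.List.pyGetD m 0 []).length : Int) = cols) →
    ls.foldl pvLayerA m = ls.foldl (pvLayerB rows cols) m := by
  induction ls with
  | nil => intro m _ _ _; rfl
  | cons l t ih =>
    intro m hls hm h0
    obtain ⟨hl, hrb, hcb⟩ := hls l List.mem_cons_self
    rw [List.foldl_cons, List.foldl_cons, pv_layer_eq rows cols l m hl hrb hcb hm h0]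
    apply ih _ (fun x hx => hls x (List.mem_cons_of_mem _ hx))
    · rw [pv_layerB_len, hm]
    · rw [PySem.List.pyGetD_zero] at h0 ⊢
      have := pv_layerB_rowlen rows cols l m hl hrb hcb 0
      simp only [List.getD] at this h0 ⊢
      rw [this, h0]

theorem pv_lt_ceilHalf {k l : Int} (h0 : 0 ≤ l) (h : l < pvCeilHalf k) : 2 * l + 1 ≤ k := by
  unfold pvCeilHalf PySem.Int.floordiv at h
  rw [Int.fdiv_eq_ediv] at h
  simp at h
  omega

theorem pv_main (matrix : List (List Int)) :
    contoursShifting matrix = contoursShifting_alt matrix := by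
  simp only [contoursShifting, contoursShifting_alt]
  apply pv_fold_eq
  · intro l hlmem
    rw [PySem.List.mem_pyRange_one] at hlmem
    have := pv_lt_ceilHalf hlmem.1 hlmem.2
    exact ⟨hlmem.1, by omega, by omega⟩
  · rfl
  · rfl

-- ===== VERDICT (by name: the statement is the Claim_ definition above) =====
theorem contoursShifting_spec : Claim_equal_contoursShifting := by
  intro matrix _ _
  unfold Spec_contoursShifting
  exact pv_main matrix
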